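-- pv_equiv track=rewrite | github.com/ksharma120497/csci-665-foundations-of-algorithms | HW3/angles.py | calculate_slopes
-- ===== SOURCE A (Python) =====
-- def find_gcd(i, j):
--     while j != 0:
--         i, j = j, i % j  # Using Euclidean algorithm to find GCD
--     return i
--
-- def calculate_slopes(coordinates):
--     list_of_slopes = [[] for _ in range(len(coordinates))]
--     for i, point1 in enumerate(coordinates):
--         for point2 in coordinates:
--             if point1 != point2:
--                 # Calculate the differences in coordinates
--                 diff_y = point1[1] - point2[1]
--                 diff_x = point2[0] - point1[0]
--                 # Calculate the greatest common divisor (GCD) to simplify the slope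
--                 gcd = find_gcd(abs(diff_x), abs(diff_y))
--                 # If the GCD is zero, set slope to (0, 0), else simplify the slope
--                 slope_tuple = (0, 0) if gcd == 0 else (diff_x // gcd, diff_y // gcd)
--                 list_of_slopes[i].append(slope_tuple)
--         # Sort the list of slopes for each point to enable binary search
--         list_of_slopes[i].sort()
--     return list_of_slopes
-- ===== SOURCE B (Python) =====
-- def find_gcd(i, j):
--     while j != 0:
--         i, j = j, i % j
--     return i
--
-- def calculate_slopes(coordinates):
--     # Pair loop: each unordered pair's slope is reduced once; the mirror entry
--     # is its componentwise negation, accumulated in a pending row.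
--     result = []
--     points = list(coordinates)
--     pending = [[] for _ in points]
--     while points:
--         p = points.pop(0)
--         row = pending.pop(0)
--         for q, pd in zip(points, pending):
--             if p != q:
--                 dy = p[1] - q[1]
--                 dx = q[0] - p[0]
--                 g = find_gcd(abs(dx), abs(dy))
--                 sx, sy = dx // g, dy // g
--                 row.append((sx, sy))
--                 pd.append((-sx, -sy))
--         result.append(sorted(row))
--     return result
-- ===== Notes on version B (the rewrite author's own statement) =====
-- stated objective: alternative
-- what changed: B replaces A's full n-squared rescan (recomputing every directed pair's gcd-reduced slope) by a single pass over unordered pairs: each pair's slope is reduced once and the mirror entry is obtained by componentwise negation, accumulated in per-point pending rows that are sorted when the point is finished.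
import Mathlib
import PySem

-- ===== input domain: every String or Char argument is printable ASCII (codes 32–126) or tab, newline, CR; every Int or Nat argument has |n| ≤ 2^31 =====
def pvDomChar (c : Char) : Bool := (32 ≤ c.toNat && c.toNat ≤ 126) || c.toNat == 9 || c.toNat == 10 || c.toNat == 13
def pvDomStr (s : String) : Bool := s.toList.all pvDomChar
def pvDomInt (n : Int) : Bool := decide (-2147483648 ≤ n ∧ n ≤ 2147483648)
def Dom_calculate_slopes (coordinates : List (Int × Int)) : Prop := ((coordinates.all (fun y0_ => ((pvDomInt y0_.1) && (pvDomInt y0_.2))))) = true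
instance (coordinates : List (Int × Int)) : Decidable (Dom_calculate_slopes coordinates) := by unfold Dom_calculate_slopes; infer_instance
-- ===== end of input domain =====

-- B computes each unordered pair's reduced slope once and fills the mirror entry by
-- componentwise negation via per-point pending rows (objective: alternative decomposition;
-- same asymptotic cost).

-- ===== PORT A =====
-- shared helper: the Python 'find_gcd' while-loop (both Source A and Source B contain it verbatim)
def find_gcd (i j : Int) : Int :=
  if h : j = 0 then i
  else find_gcd j (PySem.Int.mod i j)
termination_by j.natAbs
decreasing_by
  rcases lt_or_gt_of_ne h with hneg | hpos
  · have h1 := (PySem.Int.mod_neg_bounds (a := i) (b := j) hneg).1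
    have h2 := (PySem.Int.mod_neg_bounds (a := i) (b := j) hneg).2
    omega
  · have h1 := PySem.Int.mod_nonneg (a := i) (b := j) hpos
    have h2 := PySem.Int.mod_lt (a := i) (b := j) hpos
    omega

def calculate_slopes (coordinates : List (Int × Int)) : List (List (Int × Int)) :=
  coordinates.map (fun point1 =>
    PySem.List.sorted2
      (coordinates.foldl (fun acc point2 =>
        if point1 ≠ point2 then
          let diff_y := point1.2 - point2.2
          let diff_x := point2.1 - point1.1
          let gcd := find_gcd |diff_x| |diff_y|
          let slope_tuple :=
            if gcd = 0 then ((0 : Int), (0 : Int))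
            else (PySem.Int.floordiv diff_x gcd, PySem.Int.floordiv diff_y gcd)
          acc ++ [slope_tuple]
        else acc) [])
      Prod.fst Prod.snd)

-- ===== PORT B =====
-- inner 'for q, pd in zip(points, pending)' loop: returns the finished row and the new pending rows
def bInner (p : Int × Int) : List (Int × Int) → List (List (Int × Int)) → List (Int × Int) →
    (List (Int × Int) × List (List (Int × Int)))
  | [], _, row => (row, [])
  | q :: qs, pend, row =>
      let pd := pend.headD []
      if p ≠ q then
        let dy := p.2 - q.2
        let dx := q.1 - p.1
        let g := find_gcd |dx| |dy|
        let sx := PySem.Int.floordiv dx g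
        let sy := PySem.Int.floordiv dy g
        let r := bInner p qs pend.tail (row ++ [(sx, sy)])
        (r.1, (pd ++ [(-sx, -sy)]) :: r.2)
      else
        let r := bInner p qs pend.tail row
        (r.1, pd :: r.2)

-- outer 'while points' loop
def bRec : List (Int × Int) → List (List (Int × Int)) → List (List (Int × Int))
  | [], _ => []
  | p :: points, pending =>
      let r := bInner p points pending.tail (pending.headD [])
      PySem.List.sorted2 r.1 Prod.fst Prod.snd :: bRec points r.2

def calculate_slopes_alt (coordinates : List (Int × Int)) : List (List (Int × Int)) :=
  bRec coordinates (coordinates.map (fun _ => []))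

-- ===== PRECONDITION & SPEC =====
def Spec_calculate_slopes (coordinates : List (Int × Int)) (out : List (List (Int × Int))) : Prop := out = calculate_slopes_alt coordinates
instance (coordinates : List (Int × Int)) (out : List (List (Int × Int))) : Decidable (Spec_calculate_slopes coordinates out) := by unfold Spec_calculate_slopes; infer_instance

-- ===== CLAIM (what is proved, stated in full; the proofs are below) =====
def Claim_equal_calculate_slopes : Prop := ∀ (coordinates : List (Int × Int)), Dom_calculate_slopes coordinates → Spec_calculate_slopes coordinates (calculate_slopes coordinates)

-- ===== LEMMAS AND PROOFS =====

-- B's (unguarded) slope of a pair, and A's (gcd = 0 guarded) slope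
def slB (p q : Int × Int) : Int × Int :=
  (PySem.Int.floordiv (q.1 - p.1) (find_gcd |q.1 - p.1| |p.2 - q.2|),
   PySem.Int.floordiv (p.2 - q.2) (find_gcd |q.1 - p.1| |p.2 - q.2|))

def slA (p q : Int × Int) : Int × Int :=
  if find_gcd |q.1 - p.1| |p.2 - q.2| = 0 then (0, 0) else slB p q

-- the mirrored (negated) entries point q owes to the earlier points 'prev'
def rowNeg (q : Int × Int) (prev : List (Int × Int)) : List (Int × Int) :=
  (prev.filter (fun r => r ≠ q)).map (fun r => (-(slB r q).1, -(slB r q).2))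

lemma find_gcd_eq : ∀ (n : Nat) (i j : Int), 0 ≤ i → 0 ≤ j → j.natAbs ≤ n →
    find_gcd i j = (Nat.gcd i.natAbs j.natAbs : Int) := by
  intro n
  induction n with
  | zero =>
    intro i j hi hj hn
    have : j = 0 := by omega
    subst this
    rw [find_gcd]
    simp [Int.natAbs_of_nonneg hi]
  | succ n ih =>
    intro i j hi hj hn
    rw [find_gcd]
    split
    · next h =>
      subst h
      simp [Int.natAbs_of_nonneg hi]
    · next h =>
      have hpos : 0 < j := lt_of_le_of_ne hj (Ne.symm h)
      have hm := PySem.Int.mod_nonneg (a := i) (b := j) hpos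
      have hml := PySem.Int.mod_lt (a := i) (b := j) hpos
      have hrec := ih j (PySem.Int.mod i j) hj hm (by omega)
      rw [hrec, PySem.Int.mod_eq_emod_of_pos (by omega)]
      have hemod : (i % j).natAbs = i.natAbs % j.natAbs := by
        conv_lhs => rw [← Int.natAbs_of_nonneg hi, ← Int.natAbs_of_nonneg hj]
        rw [← Int.natCast_mod, Int.natAbs_natCast]
      rw [hemod]
      congr 1
      rw [Nat.gcd_comm i.natAbs j.natAbs, Nat.gcd_rec j.natAbs i.natAbs]
      exact Nat.gcd_comm _ _

lemma find_gcd_abs (a b : Int) : find_gcd |a| |b| = (Int.gcd a b : Int) := by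
  have h := find_gcd_eq b.natAbs |a| |b| (abs_nonneg a) (abs_nonneg b)
    (le_of_eq (by rw [Int.natAbs_abs]))
  rw [h, Int.natAbs_abs, Int.natAbs_abs]
  rfl

lemma gcd_ne (p q : Int × Int) (h : p ≠ q) : Int.gcd (q.1 - p.1) (p.2 - q.2) ≠ 0 := by
  intro h0
  unfold Int.gcd at h0
  have h1 := Nat.eq_zero_of_gcd_eq_zero_left h0
  have h2 := Nat.eq_zero_of_gcd_eq_zero_right h0
  exact h (Prod.ext (by omega) (by omega))

lemma slA_eq_slB (p q : Int × Int) (h : p ≠ q) : slA p q = slB p q := by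
  unfold slA
  rw [find_gcd_abs]
  simp [Int.natCast_eq_zero, gcd_ne p q h]

lemma floordiv_exact_neg (x g : Int) (hg : 0 < g) (hd : g ∣ x) :
    PySem.Int.floordiv (-x) g = -(PySem.Int.floordiv x g) := by
  obtain ⟨c, rfl⟩ := hd
  rw [PySem.Int.floordiv_eq_ediv_of_pos hg, PySem.Int.floordiv_eq_ediv_of_pos hg]
  rw [show -(g * c) = g * (-c) by ring]
  rw [Int.mul_ediv_cancel_left _ (by omega), Int.mul_ediv_cancel_left _ (by omega)]

lemma slB_swap (p q : Int × Int) (h : p ≠ q) :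
    slB q p = (-(slB p q).1, -(slB p q).2) := by
  have hgcd := gcd_ne p q h
  have hpos : (0 : Int) < (Int.gcd (q.1 - p.1) (p.2 - q.2) : Int) := by
    exact_mod_cast Nat.pos_of_ne_zero hgcd
  unfold slB
  rw [show p.1 - q.1 = -(q.1 - p.1) by ring, show q.2 - p.2 = -(p.2 - q.2) by ring,
      abs_neg, abs_neg]
  simp only [find_gcd_abs]
  refine Prod.ext ?_ ?_
  · exact floordiv_exact_neg _ _ hpos (Int.gcd_dvd_left _ _)
  · exact floordiv_exact_neg _ _ hpos (Int.gcd_dvd_right _ _)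

lemma rowA_foldl (p : Int × Int) (l : List (Int × Int)) (acc : List (Int × Int)) :
    l.foldl (fun acc point2 =>
        if p ≠ point2 then
          let diff_y := p.2 - point2.2
          let diff_x := point2.1 - p.1
          let gcd := find_gcd |diff_x| |diff_y|
          let slope_tuple :=
            if gcd = 0 then ((0 : Int), (0 : Int))
            else (PySem.Int.floordiv diff_x gcd, PySem.Int.floordiv diff_y gcd)
          acc ++ [slope_tuple]
        else acc) acc
    = acc ++ (l.filter (fun q => p ≠ q)).map (slA p) := by
  induction l generalizing acc with
  | nil => simp
  | cons q qs ih =>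
    simp only [List.foldl_cons, List.filter_cons]
    by_cases h : p ≠ q
    · rw [if_pos h, ih, if_pos (show (decide (p ≠ q)) = true by simpa using h), List.map_cons,
        List.append_assoc, List.singleton_append]
      rfl
    · simp only [if_neg h, ih]
      simp at h
      simp [h]

lemma bInner_spec (p : Int × Int) : ∀ (qs prev row : List (Int × Int)),
    bInner p qs (qs.map (fun q => rowNeg q prev)) row
      = (row ++ (qs.filter (fun q => p ≠ q)).map (slB p),
         qs.map (fun q => rowNeg q (prev ++ [p]))) := by
  intro qs
  induction qs with
  | nil => intro prev row; simp [bInner]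
  | cons q qs ih =>
    intro prev row
    simp only [List.map_cons, bInner, List.headD_cons, List.tail_cons, List.filter_cons]
    by_cases h : p = q
    · rw [if_neg (by simp [h]), ih]
      have hq : rowNeg q (prev ++ [p]) = rowNeg q prev := by
        unfold rowNeg
        rw [List.filter_append, List.map_append]
        simp [h]
      rw [hq, if_neg (by simp [h])]
    · rw [if_pos h, ih, if_pos (by simpa using h)]
      have hq : rowNeg q (prev ++ [p]) = rowNeg q prev ++ [(-(slB p q).1, -(slB p q).2)] := by
        unfold rowNeg
        rw [List.filter_append, List.map_append]
        congr 1
        rw [List.filter_cons_of_pos (by simpa using h)]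
        rfl
      rw [hq]
      simp [slB, List.append_assoc]

lemma bRec_spec : ∀ (pts prev L : List (Int × Int)), L = prev ++ pts →
    bRec pts (pts.map (fun q => rowNeg q prev))
      = pts.map (fun p => PySem.List.sorted2 ((L.filter (fun q => p ≠ q)).map (slA p)) Prod.fst Prod.snd) := by
  intro pts
  induction pts with
  | nil => intro prev L _; simp [bRec]
  | cons p rest ih =>
    intro prev L hL
    simp only [List.map_cons, bRec, List.headD_cons, List.tail_cons]
    rw [bInner_spec]
    have harg : rowNeg p prev ++ (rest.filter (fun q => p ≠ q)).map (slB p)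
        = (L.filter (fun q => p ≠ q)).map (slA p) := by
      subst hL
      rw [List.filter_append, List.map_append, List.filter_cons_of_neg (by simp)]
      congr 1
      · unfold rowNeg
        rw [show (fun r : Int × Int => decide (r ≠ p)) = (fun r => decide (p ≠ r)) from
          funext fun r => decide_eq_decide.mpr ne_comm]
        apply List.map_congr_left
        intro r hr
        have hpr : p ≠ r := by simpa using (List.mem_filter.mp hr).2
        rw [slA_eq_slB p r hpr, slB_swap p r hpr]
        simp
      · apply List.map_congr_left
        intro q hq
        have hpq : p ≠ q := by simpa using (List.mem_filter.mp hq).2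
        exact (slA_eq_slB p q hpq).symm
    simp only
    rw [harg, ih (prev ++ [p]) L (by simp [hL])]

-- ===== VERDICT (by name: the statement is the Claim_ definition above) =====
theorem calculate_slopes_spec : Claim_equal_calculate_slopes := by
  intro coordinates _
  unfold Spec_calculate_slopes calculate_slopes calculate_slopes_alt
  have hinit : coordinates.map (fun _ => ([] : List (Int × Int)))
      = coordinates.map (fun q => rowNeg q []) := by
    apply List.map_congr_left; intro q _; simp [rowNeg]
  rw [hinit, bRec_spec coordinates [] coordinates (by simp)]
  apply List.map_congr_left
  intro p _
  rw [rowA_foldl]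
  simp
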